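-- pv_equiv track=rewrite | github.com/Anduong1200/sentinel-netlab | sensor/tui/setup_wizard.py | _parse_iw_dev_interfaces
-- ===== SOURCE A (Python) =====
-- def _parse_iw_dev_interfaces(text: str) -> dict[str, str]:
--     """Parse interface name -> mode from `iw dev` output."""
--     interfaces: dict[str, str] = {}
--     current: str | None = None
--     for raw_line in text.splitlines():
--         line = raw_line.strip()
--         if line.startswith("Interface "):
--             current = line.split(maxsplit=1)[1]
--             interfaces.setdefault(current, "unknown")
--             continue
--         if current and line.startswith("type "):
--             interfaces[current] = line.split(maxsplit=1)[1].strip().lower()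
--     return interfaces
-- ===== SOURCE B (Python) =====
-- def _parse_iw_dev_interfaces(text: str) -> dict[str, str]:
--     """Parse interface name -> mode from `iw dev` output (block-at-a-time)."""
--     lines = [raw.strip() for raw in text.splitlines()]
--     n = len(lines)
--     result: dict[str, str] = {}
--     i = 0
--     while i < n:
--         line = lines[i]
--         i += 1
--         if not line.startswith("Interface "):
--             continue
--         name = line.split(maxsplit=1)[1]
--         mode = None
--         while i < n and not lines[i].startswith("Interface "):
--             if lines[i].startswith("type "):
--                 mode = lines[i].split(maxsplit=1)[1].strip().lower()
--             i += 1
--         if mode is not None: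
--             result[name] = mode
--         elif name not in result:
--             result[name] = "unknown"
--     return result
-- ===== Notes on version B (the rewrite author's own statement) =====
-- stated objective: alternative
-- what changed: Replaces A's single-pass state machine (a current-interface pointer carried across lines) with a block-at-a-time decomposition: an outer loop that jumps from one interface header line to the next and an inner scan that collects the last mode line of each block before doing one dict update per block.
import Mathlib
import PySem

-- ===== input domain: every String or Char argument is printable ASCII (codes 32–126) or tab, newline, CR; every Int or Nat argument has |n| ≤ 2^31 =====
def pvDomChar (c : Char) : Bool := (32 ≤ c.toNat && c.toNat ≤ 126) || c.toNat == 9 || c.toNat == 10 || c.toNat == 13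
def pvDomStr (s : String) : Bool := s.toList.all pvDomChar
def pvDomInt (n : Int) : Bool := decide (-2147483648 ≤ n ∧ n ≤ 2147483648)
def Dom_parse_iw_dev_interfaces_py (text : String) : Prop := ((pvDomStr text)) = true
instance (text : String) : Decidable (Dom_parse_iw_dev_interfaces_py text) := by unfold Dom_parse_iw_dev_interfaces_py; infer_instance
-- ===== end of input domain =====

-- B re-implements the single-pass state machine as a block-at-a-time scan (outer loop over
-- interface header lines, inner scan collecting the last mode line of the block); same values,
-- different decomposition (objective: alternative).

-- shared primitive shorthands (line.split(maxsplit=1)[1], the header test, the type payload)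
def pvWord1 (line : String) : String := (PySem.Str.split₀Max line 1).getD 1 ""
def pvIsHeader (line : String) : Bool := PySem.Str.startswith line "Interface "
def pvTypePayload (line : String) : String := PySem.Str.lower (PySem.Str.strip (pvWord1 line))

-- ===== PORT A =====
def parseIwStepA (s : PySem.Dict String String × Option String) (raw : String) :
    PySem.Dict String String × Option String :=
  let line := PySem.Str.strip raw
  if pvIsHeader line then
    let current := pvWord1 line
    (s.1.setdefault current "unknown", some current)
  else
    match s.2 with
    | some cur =>
        if !(cur == "") && PySem.Str.startswith line "type " then
          (s.1.insert cur (pvTypePayload line), some cur)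
        else s
    | none => s

def parse_iw_dev_interfaces_py (text : String) : List (String × String) :=
  ((PySem.Str.splitlines text).foldl parseIwStepA (PySem.Dict.empty, none)).1.items

-- ===== PORT B =====
-- inner while loop: scan the block body (up to the next header), keeping the last mode payload
def parseIwScanBody : List String → Option String → Option String × List String
  | [], mode => (mode, [])
  | line :: rest, mode =>
    if pvIsHeader line then (mode, line :: rest)
    else parseIwScanBody rest
          (if PySem.Str.startswith line "type " then some (pvTypePayload line) else mode)

-- (termination helper for the outer loop; cited by parseIwLoopB's decreasing_by)
lemma parseIwScanBody_length : ∀ (ls : List String) (m : Option String),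
    (parseIwScanBody ls m).2.length ≤ ls.length := by
  intro ls
  induction ls with
  | nil => intro m; simp [parseIwScanBody]
  | cons l rest ih =>
      intro m
      by_cases h : pvIsHeader l = true
      · simp [parseIwScanBody, h]
      · simp only [parseIwScanBody, h, if_false, Bool.false_eq_true]
        exact le_trans (ih _) (by simp)

-- the `if mode is not None … elif name not in result …` update at the end of a block
def parseIwBlockUpdate (d : PySem.Dict String String) (name : String) :
    Option String → PySem.Dict String String
  | some m => d.insert name m
  | none => if d.contains name then d else d.insert name "unknown"

-- outer while loop: skip to the next header, scan its block, update the dict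
def parseIwLoopB : List String → PySem.Dict String String → PySem.Dict String String
  | [], d => d
  | line :: rest, d =>
    if pvIsHeader line then
      let r := parseIwScanBody rest none
      parseIwLoopB r.2 (parseIwBlockUpdate d (pvWord1 line) r.1)
    else parseIwLoopB rest d
termination_by ls => ls.length
decreasing_by
  · exact Nat.lt_succ_of_le (parseIwScanBody_length rest none)
  · simp

def parse_iw_dev_interfaces_py_alt (text : String) : List (String × String) :=
  (parseIwLoopB ((PySem.Str.splitlines text).map PySem.Str.strip) PySem.Dict.empty).items

-- ===== PRECONDITION & SPEC =====
def Spec_parse_iw_dev_interfaces_py (text : String) (out : List (String × String)) : Prop := out = parse_iw_dev_interfaces_py_alt text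
instance (text : String) (out : List (String × String)) : Decidable (Spec_parse_iw_dev_interfaces_py text out) := by unfold Spec_parse_iw_dev_interfaces_py; infer_instance

-- ===== CLAIM (what is proved, stated in full; the proofs are below) =====
def Claim_equal_parse_iw_dev_interfaces_py : Prop := ∀ (text : String), Dom_parse_iw_dev_interfaces_py text → Spec_parse_iw_dev_interfaces_py text (parse_iw_dev_interfaces_py text)

-- ===== LEMMAS AND PROOFS =====

lemma pvSplitHeader (t : List Char) (ht : List.dropWhile PySem.Chars.isspace t ≠ []) :
  PySem.Chars.split₀Max (['I','n','t','e','r','f','a','c','e',' '] ++ t) 1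
  = [['I','n','t','e','r','f','a','c','e'], List.dropWhile PySem.Chars.isspace t] := by
  unfold PySem.Chars.split₀Max
  norm_num
  rw [PySem.Chars.split₀Max.go.eq_def]
  simp only [List.dropWhile_cons, List.takeWhile_cons,
    (by decide : PySem.Chars.isspace 'I' = false), (by decide : PySem.Chars.isspace 'n' = false),
    (by decide : PySem.Chars.isspace 't' = false), (by decide : PySem.Chars.isspace 'e' = false),
    (by decide : PySem.Chars.isspace 'r' = false), (by decide : PySem.Chars.isspace 'f' = false),
    (by decide : PySem.Chars.isspace 'a' = false), (by decide : PySem.Chars.isspace 'c' = false),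
    (by decide : PySem.Chars.isspace ' ' = true),
    Bool.not_false, Bool.not_true, Bool.false_eq_true, if_true, if_false]
  rw [if_neg (by decide : ¬(1 = 0))]
  rw [show t.length + 10 = (t.length + 9) + 1 from rfl]
  rw [PySem.Chars.split₀Max.go.eq_def]
  simp only [List.dropWhile_cons, (by decide : PySem.Chars.isspace ' ' = true), if_true]
  cases hlt : List.dropWhile PySem.Chars.isspace t with
  | nil => exact absurd hlt ht
  | cons c cs => simp

-- the interface name on a stripped header line is never empty
lemma pvHdrName_ne (raw : String) (h : pvIsHeader (PySem.Str.strip raw) = true) :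
    pvWord1 (PySem.Str.strip raw) ≠ "" := by
  have hsl : (PySem.Str.strip raw).toList = PySem.Chars.strip raw.toList := by simp
  have hpre : (['I','n','t','e','r','f','a','c','e',' '] : List Char) <+: PySem.Chars.strip raw.toList := by
    have := h
    simp only [pvIsHeader] at this
    rw [PySem.Str.startswith_eq] at this
    rw [← PySem.Chars.startswith_iff]
    simpa [hsl] using this
  obtain ⟨t, ht⟩ := hpre
  -- the tail t is not all-whitespace: the stripped line has no trailing whitespace
  have hrev : PySem.Chars.strip raw.toList
      = (List.dropWhile PySem.Chars.isspace (PySem.Chars.lstrip raw.toList).reverse).reverse := rfl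
  have hdw : List.dropWhile PySem.Chars.isspace t ≠ [] := by
    intro hnil
    have hallws : ∀ c ∈ t, PySem.Chars.isspace c = true := List.dropWhile_eq_nil_iff.mp hnil
    -- reverse of the stripped line starts after dropping ws with 9 chars
    have hidem : List.dropWhile PySem.Chars.isspace (PySem.Chars.strip raw.toList).reverse
        = (PySem.Chars.strip raw.toList).reverse := by
      rw [hrev, List.reverse_reverse]
      exact List.dropWhile_idempotent _ _
    rw [← ht] at hidem
    have hrevapp : (['I','n','t','e','r','f','a','c','e',' '] ++ t).reverse
        = t.reverse ++ [' ','e','c','a','f','r','e','t','n','I'] := by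
      rw [List.reverse_append]; rfl
    rw [hrevapp] at hidem
    have hall' : List.dropWhile PySem.Chars.isspace t.reverse = [] := by
      rw [List.dropWhile_eq_nil_iff]
      intro x hx
      exact hallws x (List.mem_reverse.mp hx)
    rw [List.dropWhile_append, hall'] at hidem
    simp only [List.isEmpty_nil, if_true] at hidem
    rw [(by decide : List.dropWhile PySem.Chars.isspace ([' ','e','c','a','f','r','e','t','n','I'] : List Char)
          = ['e','c','a','f','r','e','t','n','I'])] at hidem
    have hlen := congrArg List.length hidem
    simp at hlen
  intro hcontr
  have : pvWord1 (PySem.Str.strip raw) = String.ofList (List.dropWhile PySem.Chars.isspace t) := by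
    unfold pvWord1
    unfold PySem.Str.split₀Max
    rw [hsl, ← ht, pvSplitHeader t hdw]
    rfl
  rw [this] at hcontr
  have : List.dropWhile PySem.Chars.isspace t = [] :=
    String.ofList_inj.mp (hcontr.trans (by rfl))
  exact hdw this

lemma parseIwBlockUpdate_none (d : PySem.Dict String String) (name : String) :
    d.setdefault name "unknown" = parseIwBlockUpdate d name none := by
  simp only [parseIwBlockUpdate]
  by_cases h : d.contains name = true
  · rw [PySem.Dict.setdefault_of_contains d _ h, if_pos h]
  · rw [PySem.Dict.setdefault_of_not_contains d _ (by simpa using h), if_neg h]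

lemma parseIwBlockUpdate_insert (d : PySem.Dict String String) (name p : String)
    (m0 : Option String) :
    (parseIwBlockUpdate d name m0).insert name p = d.insert name p := by
  cases m0 with
  | some m => simp [parseIwBlockUpdate, PySem.Dict.insert_insert_self]
  | none =>
      simp only [parseIwBlockUpdate]
      by_cases h : d.contains name = true
      · rw [if_pos h]
      · rw [if_neg h, PySem.Dict.insert_insert_self]

lemma parseIw_main : ∀ (ls : List String) (d : PySem.Dict String String) (name : String)
    (m0 : Option String), name ≠ "" →
    (ls.foldl parseIwStepA (parseIwBlockUpdate d name m0, some name)).1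
      = parseIwLoopB (parseIwScanBody (ls.map PySem.Str.strip) m0).2
          (parseIwBlockUpdate d name (parseIwScanBody (ls.map PySem.Str.strip) m0).1) := by
  intro ls
  induction ls with
  | nil => intro d name m0 _; simp [parseIwScanBody, parseIwLoopB]
  | cons raw rest ih =>
      intro d name m0 hname
      by_cases hh : pvIsHeader (PySem.Str.strip raw) = true
      · have hhc : PySem.Chars.startswith (PySem.Chars.strip raw.toList) ['I','n','t','e','r','f','a','c','e',' '] = true := by
          simpa [pvIsHeader] using hh
        have hn' := pvHdrName_ne raw hh
        simp only [List.foldl_cons, List.map_cons]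
        rw [show parseIwStepA (parseIwBlockUpdate d name m0, some name) raw
              = ((parseIwBlockUpdate d name m0).setdefault (pvWord1 (PySem.Str.strip raw)) "unknown",
                 some (pvWord1 (PySem.Str.strip raw))) by
            simp [parseIwStepA, pvIsHeader, hhc]]
        rw [parseIwBlockUpdate_none, ih _ _ none hn']
        simp [parseIwScanBody, parseIwLoopB, pvIsHeader, hhc]
      · have hhc : PySem.Chars.startswith (PySem.Chars.strip raw.toList) ['I','n','t','e','r','f','a','c','e',' '] = false := by
          simpa [pvIsHeader] using hh
        by_cases ht : PySem.Str.startswith (PySem.Str.strip raw) "type " = true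
        · have htc : PySem.Chars.startswith (PySem.Chars.strip raw.toList) ['t','y','p','e',' '] = true := by
            simpa using ht
          simp only [List.foldl_cons, List.map_cons]
          rw [show parseIwStepA (parseIwBlockUpdate d name m0, some name) raw
                = ((parseIwBlockUpdate d name m0).insert name (pvTypePayload (PySem.Str.strip raw)), some name) by
              simp [parseIwStepA, pvIsHeader, hhc, htc, hname]]
          rw [parseIwBlockUpdate_insert,
              show (d.insert name (pvTypePayload (PySem.Str.strip raw)))
                = parseIwBlockUpdate d name (some (pvTypePayload (PySem.Str.strip raw))) from rfl,
              ih _ _ _ hname]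
          simp [parseIwScanBody, pvIsHeader, hhc, htc]
        · have htc : PySem.Chars.startswith (PySem.Chars.strip raw.toList) ['t','y','p','e',' '] = false := by
            simpa using ht
          simp only [List.foldl_cons, List.map_cons]
          rw [show parseIwStepA (parseIwBlockUpdate d name m0, some name) raw
                = (parseIwBlockUpdate d name m0, some name) by
              simp [parseIwStepA, pvIsHeader, hhc, htc]]
          rw [ih _ _ _ hname]
          simp [parseIwScanBody, pvIsHeader, hhc, htc]

lemma parseIw_skip : ∀ (ls : List String) (d : PySem.Dict String String),
    (ls.foldl parseIwStepA (d, none)).1 = parseIwLoopB (ls.map PySem.Str.strip) d := by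
  intro ls
  induction ls with
  | nil => intro d; simp [parseIwLoopB]
  | cons raw rest ih =>
      intro d
      by_cases hh : pvIsHeader (PySem.Str.strip raw) = true
      · have hhc : PySem.Chars.startswith (PySem.Chars.strip raw.toList) ['I','n','t','e','r','f','a','c','e',' '] = true := by
          simpa [pvIsHeader] using hh
        have hn' := pvHdrName_ne raw hh
        simp only [List.foldl_cons, List.map_cons]
        rw [show parseIwStepA (d, none) raw
              = (d.setdefault (pvWord1 (PySem.Str.strip raw)) "unknown",
                 some (pvWord1 (PySem.Str.strip raw))) by
            simp [parseIwStepA, pvIsHeader, hhc]]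
        rw [parseIwBlockUpdate_none, parseIw_main _ _ _ none hn']
        simp [parseIwLoopB, pvIsHeader, hhc]
      · have hhc : PySem.Chars.startswith (PySem.Chars.strip raw.toList) ['I','n','t','e','r','f','a','c','e',' '] = false := by
          simpa [pvIsHeader] using hh
        simp only [List.foldl_cons, List.map_cons]
        rw [show parseIwStepA (d, none) raw = (d, none) by simp [parseIwStepA, pvIsHeader, hhc]]
        rw [ih d]
        simp [parseIwLoopB, pvIsHeader, hhc]

-- ===== VERDICT (by name: the statement is the Claim_ definition above) =====
theorem parse_iw_dev_interfaces_py_spec : Claim_equal_parse_iw_dev_interfaces_py := by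
  intro text _
  unfold Spec_parse_iw_dev_interfaces_py parse_iw_dev_interfaces_py parse_iw_dev_interfaces_py_alt
  rw [parseIw_skip]
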